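-- pv_equiv track=rewrite | github.com/dsorato/MCSQ_compiling | preprocess_supp_spreadsheets.py | split_scale_without_numbers
-- ===== SOURCE A (Python) =====
-- def split_scale_without_numbers(sentence):
-- 	is_scale = False
-- 	scale_items = []
-- 	index_uppercase = []
--
-- 	for i, s in enumerate(sentence):
-- 		if s.isupper():
-- 			index_uppercase.append(i)
--
--
-- 	if len(index_uppercase) > 1:
-- 		is_scale = True
-- 		for i, index in enumerate(index_uppercase):
-- 			if index == index_uppercase[-1]:
-- 				scale_items.append(sentence[index:])
-- 			else:
-- 				scale_items.append(sentence[index:(index_uppercase[i+1]-1)])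
--
--
-- 	return is_scale, scale_items
-- ===== SOURCE B (Python) =====
-- def split_scale_without_numbers(sentence):
-- 	count = 0
-- 	buf = []
-- 	scale_items = []
-- 	for c in sentence:
-- 		if c.isupper():
-- 			if count > 0:
-- 				scale_items.append(''.join(buf[:-1]))
-- 			buf = [c]
-- 			count += 1
-- 		elif count > 0:
-- 			buf.append(c)
-- 	if count > 1:
-- 		return True, scale_items + [''.join(buf)]
-- 	return False, []
-- ===== Notes on version B (the rewrite author's own statement) =====
-- stated objective: alternative
-- what changed: Replaced A's two-pass scheme (collect all uppercase indices, then slice the sentence between consecutive indices with index arithmetic) by a single streaming pass that maintains an uppercase counter and a running buffer, closing a segment whenever the next uppercase character arrives and flushing the final buffer after the loop.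
import Mathlib
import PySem

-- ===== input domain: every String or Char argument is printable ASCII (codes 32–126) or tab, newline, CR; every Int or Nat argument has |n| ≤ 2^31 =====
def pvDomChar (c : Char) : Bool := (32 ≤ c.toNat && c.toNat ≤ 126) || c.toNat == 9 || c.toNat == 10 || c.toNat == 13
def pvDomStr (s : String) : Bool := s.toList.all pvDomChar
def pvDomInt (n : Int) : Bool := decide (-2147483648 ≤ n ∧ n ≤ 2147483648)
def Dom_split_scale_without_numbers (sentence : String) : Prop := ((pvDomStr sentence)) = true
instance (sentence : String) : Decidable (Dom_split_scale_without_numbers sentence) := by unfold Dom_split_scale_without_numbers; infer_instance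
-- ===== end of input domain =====

-- B replaces A's two passes (collect all uppercase indices, then slice between consecutive indices)
-- by a single streaming pass with a running buffer and an uppercase counter; same return value.

-- ===== PORT A =====
-- literal port of A: collect uppercase indices, then slice between consecutive indices
def split_scale_without_numbers (sentence : String) : Bool × List String :=
  let idx : List Int :=
    (PySem.List.enumerate sentence.toList).foldl
      (fun acc p => if PySem.Chars.isupper p.2 then acc ++ [p.1] else acc) []
  if idx.length > 1 then
    (true,
      (PySem.List.enumerate idx).foldl
        (fun acc p =>
          if p.2 == PySem.List.pyGetD idx (-1) 0 then
            acc ++ [String.ofList (PySem.Chars.slice sentence.toList (some p.2) none)]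
          else
            acc ++ [String.ofList (PySem.Chars.slice sentence.toList (some p.2)
                      (some (PySem.List.pyGetD idx (p.1 + 1) 0 - 1)))])
        [])
  else (false, [])

-- ===== PORT B =====
-- literal port of B: one pass, state = (uppercase count, open buffer, finished segments)
def split_scale_without_numbers_alt (sentence : String) : Bool × List String :=
  let st :=
    sentence.toList.foldl
      (fun (st : Nat × List Char × List String) c =>
        if PySem.Chars.isupper c then
          if st.1 > 0 then (st.1 + 1, [c], st.2.2 ++ [String.ofList st.2.1.dropLast])
          else (st.1 + 1, [c], st.2.2)
        else if st.1 > 0 then (st.1, st.2.1 ++ [c], st.2.2)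
        else st)
      (0, [], [])
  if st.1 > 1 then (true, st.2.2 ++ [String.ofList st.2.1]) else (false, [])

-- ===== PRECONDITION & SPEC =====
def Spec_split_scale_without_numbers (sentence : String) (out : Bool × List String) : Prop := out = split_scale_without_numbers_alt sentence
instance (sentence : String) (out : Bool × List String) : Decidable (Spec_split_scale_without_numbers sentence out) := by unfold Spec_split_scale_without_numbers; infer_instance

-- ===== CLAIM (what is proved, stated in full; the proofs are below) =====
def Claim_equal_split_scale_without_numbers : Prop := ∀ (sentence : String), Dom_split_scale_without_numbers sentence → Spec_split_scale_without_numbers sentence (split_scale_without_numbers sentence)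

-- ===== LEMMAS AND PROOFS =====

-- the uppercase-index list both programs are organised around (proof-side only)
def upIdx (cs : List Char) : List Int :=
  ((PySem.List.enumerate cs).filter (fun p => PySem.Chars.isupper p.2)).map (·.1)

-- the closed segments (all but the last) determined by the index list
def closedSegs (cs : List Char) : List Int → List String
  | j :: j' :: rest =>
      String.ofList ((cs.drop j.toNat).take ((j' - 1).toNat - j.toNat)) :: closedSegs cs (j' :: rest)
  | _ => []

-- B's loop body, named for the proofs (definitionally the lambda in the port)
def bStep (st : Nat × List Char × List String) (c : Char) : Nat × List Char × List String :=
  if PySem.Chars.isupper c then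
    if st.1 > 0 then (st.1 + 1, [c], st.2.2 ++ [String.ofList st.2.1.dropLast])
    else (st.1 + 1, [c], st.2.2)
  else if st.1 > 0 then (st.1, st.2.1 ++ [c], st.2.2)
  else st

theorem enumerate_append_singleton {α : Type} (xs : List α) (c : α) (s : Int) :
    PySem.List.enumerate (xs ++ [c]) s
      = PySem.List.enumerate xs s ++ [(s + xs.length, c)] := by
  induction xs generalizing s with
  | nil => simp [PySem.List.enumerate_nil, PySem.List.enumerate_cons]
  | cons x xs ih =>
      simp [PySem.List.enumerate_cons, ih (s + 1)]
      ring_nf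

theorem upIdx_append (cs : List Char) (c : Char) :
    upIdx (cs ++ [c])
      = upIdx cs ++ (if PySem.Chars.isupper c then [(cs.length : Int)] else []) := by
  unfold upIdx
  rw [enumerate_append_singleton]
  by_cases h : PySem.Chars.isupper c
  · simp [h, List.filter_append]
  · simp [h, List.filter_append]

theorem pyGetD_last (l : List Int) (j : Int) :
    PySem.List.pyGetD (l ++ [j]) (-1) 0 = j := by
  unfold PySem.List.pyGetD PySem.List.pyGet? PySem.List.pyIdx?
  have h1 : ¬ (0 : Int) ≤ -1 := by omega
  have h2 : -((l ++ [j]).length : Int) ≤ -1 := by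
    simp only [List.length_append, List.length_cons, List.length_nil]
    push_cast; omega
  simp only [h1, if_false, h2, if_true]
  have h3 : (l ++ [j]).length - (-(-1 : Int)).toNat = l.length := by simp
  rw [h3]
  simp

theorem pyGetD_neg_one (l : List Int) (h : l ≠ []) :
    PySem.List.pyGetD l (-1) 0 = l.getLast h := by
  have := pyGetD_last l.dropLast (l.getLast h)
  rw [List.dropLast_append_getLast h] at this
  exact this

theorem pyGetD_mid (pre : List Int) (j j' : Int) (rest : List Int) :
    PySem.List.pyGetD (pre ++ j :: j' :: rest) ((pre.length : Int) + 1) 0 = j' := by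
  have : ((pre.length : Int) + 1) = ((pre.length + 1 : Nat) : Int) := by push_cast; ring
  rw [this, PySem.List.pyGetD_natCast]
  rw [List.getD_eq_getElem?_getD]
  rw [List.getElem?_append_right (by omega)]
  simp

theorem closedSegs_append_char (cs : List Char) (c : Char) :
    ∀ l : List Int, (∀ j ∈ l, 0 ≤ j ∧ j < (cs.length : Int)) →
      closedSegs (cs ++ [c]) l = closedSegs cs l := by
  intro l
  induction l with
  | nil => intro _; simp [closedSegs]
  | cons j t ih =>
      intro hb
      cases t with
      | nil => rfl
      | cons j' rest =>
          have hj := hb j (by simp)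
          have hj' := hb j' (by simp)
          have hdrop : (cs ++ [c]).drop j.toNat = cs.drop j.toNat ++ [c] :=
            List.drop_append_of_le_length (by omega)
          have htake : (cs.drop j.toNat ++ [c]).take ((j' - 1).toNat - j.toNat)
              = (cs.drop j.toNat).take ((j' - 1).toNat - j.toNat) :=
            List.take_append_of_le_length (by simp; omega)
          simp only [closedSegs, hdrop, htake]
          rw [ih (fun x hx => hb x (by simp [hx]))]

theorem closedSegs_snoc (cs : List Char) :
    ∀ (l : List Int) (j n : Int),
      closedSegs cs ((l ++ [j]) ++ [n])
        = closedSegs cs (l ++ [j])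
          ++ [String.ofList ((cs.drop j.toNat).take ((n - 1).toNat - j.toNat))] := by
  intro l
  induction l with
  | nil => intro j n; simp [closedSegs]
  | cons a t ih =>
      intro j n
      cases t with
      | nil => rfl
      | cons b t' =>
          have := ih j n
          simp only [List.cons_append, closedSegs] at *
          rw [this]

-- the master invariant: bounds and ordering of the uppercase indices, and B's loop state
theorem master (cs : List Char) :
    (∀ j ∈ upIdx cs, 0 ≤ j ∧ j < (cs.length : Int)) ∧
    (upIdx cs).Pairwise (· < ·) ∧
    (upIdx cs = [] → cs.foldl bStep (0, [], []) = (0, [], [])) ∧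
    (∀ js j, upIdx cs = js ++ [j] →
       cs.foldl bStep (0, [], [])
         = (js.length + 1, cs.drop j.toNat, closedSegs cs (js ++ [j]))) := by
  induction cs using List.reverseRecOn with
  | nil =>
      refine ⟨by simp [upIdx], by simp [upIdx], by simp, ?_⟩
      intro js j h
      simp [upIdx] at h
  | append_singleton cs c ih =>
      obtain ⟨hb, hp, hnil, hsnoc⟩ := ih
      have hfold : (cs ++ [c]).foldl bStep (0, [], [])
          = bStep (cs.foldl bStep (0, [], [])) c := by
        rw [List.foldl_append]; rfl
      by_cases hc : PySem.Chars.isupper c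
      · -- c is uppercase: a new index cs.length is appended
        have hup : upIdx (cs ++ [c]) = upIdx cs ++ [(cs.length : Int)] := by
          rw [upIdx_append, if_pos hc]
        refine ⟨?_, ?_, ?_, ?_⟩
        · intro j hj
          have hlen1 : (((cs ++ [c]).length : Int)) = (cs.length : Int) + 1 := by simp
          rw [hup] at hj
          rcases List.mem_append.mp hj with h | h
          · have := hb j h; exact ⟨this.1, by omega⟩
          · simp at h; subst h; exact ⟨by omega, by omega⟩
        · rw [hup]
          refine List.pairwise_append.mpr ⟨hp, by simp, ?_⟩
          intro x hx y hy
          simp at hy; subst hy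
          exact (hb x hx).2
        · intro h; rw [hup] at h; simp at h
        · intro js j h
          rw [hup] at h
          have hj : j = (cs.length : Int) := by
            have := congrArg (fun l => l.getLast?) h
            simpa using this.symm
          have hjs : js = upIdx cs := by
            have := congrArg List.dropLast h
            simpa using this.symm
          subst hj; subst hjs
          by_cases hemp : upIdx cs = []
          · -- first uppercase character
            rw [hfold, hnil hemp, hemp]
            simp [bStep, hc, closedSegs]
          · -- upIdx cs nonempty: decompose as js' ++ [j']
            obtain ⟨js', j', hdec⟩ : ∃ js' j', upIdx cs = js' ++ [j'] :=
              ⟨(upIdx cs).dropLast, (upIdx cs).getLast hemp,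
                (List.dropLast_append_getLast hemp).symm⟩
            rw [hfold, hsnoc js' j' hdec, hdec]
            have hj' := hb j' (by rw [hdec]; simp)
            simp only [bStep, hc, if_true, if_pos (Nat.succ_pos _)]
            have hdropLast : (cs.drop j'.toNat).dropLast
                = ((cs ++ [c]).drop j'.toNat).take (((cs.length : Int) - 1).toNat - j'.toNat) := by
              rw [List.drop_append_of_le_length (by omega)]
              rw [List.take_append_of_le_length (by simp; omega)]
              rw [List.dropLast_eq_take]
              congr 1
              simp; omega
            have hclosed : closedSegs (cs ++ [c]) ((js' ++ [j']) ++ [(cs.length : Int)])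
                = closedSegs cs (js' ++ [j'])
                  ++ [String.ofList ((cs.drop j'.toNat).dropLast)] := by
              rw [closedSegs_snoc]
              rw [closedSegs_append_char cs c _ (fun x hx => hb x (by rw [hdec]; exact hx))]
              rw [hdropLast]
            rw [hclosed]
            have hdropnew : (cs ++ [c]).drop ((cs.length : Int)).toNat = [c] := by
              simp
            rw [hdropnew]
            simp
      · -- c not uppercase
        have hup : upIdx (cs ++ [c]) = upIdx cs := by
          rw [upIdx_append, if_neg hc]; simp
        refine ⟨?_, ?_, ?_, ?_⟩
        · intro j hj
          have hlen1 : (((cs ++ [c]).length : Int)) = (cs.length : Int) + 1 := by simp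
          rw [hup] at hj
          have := hb j hj
          exact ⟨this.1, by omega⟩
        · rw [hup]; exact hp
        · intro h; rw [hup] at h
          rw [hfold, hnil h]
          simp [bStep, hc]
        · intro js j h
          rw [hup] at h
          rw [hfold, hsnoc js j h]
          have hj := hb j (by rw [h]; simp)
          simp only [bStep]
          rw [List.drop_append_of_le_length (by omega)]
          rw [closedSegs_append_char cs c _ (fun x hx => hb x (by rw [h]; exact hx))]
          simp [hc]

theorem getLast_append_right {α : Type} (pre suf : List α) (h : suf ≠ []) :
    (pre ++ suf).getLast (by simp [h]) = suf.getLast h := by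
  rw [List.getLast_append]
  simp [h]

-- A's second loop, as a map over the enumerate of a suffix of the full index list
theorem A_items (cs : List Char) (full : List Int)
    (hb : ∀ x ∈ full, 0 ≤ x ∧ x < (cs.length : Int)) (hp : full.Pairwise (· < ·)) :
    ∀ (suf pre : List Int), full = pre ++ suf → ∀ (hsuf : suf ≠ []),
      (PySem.List.enumerate suf (pre.length)).map
        (fun p =>
          if p.2 == PySem.List.pyGetD full (-1) 0 then
            String.ofList (PySem.Chars.slice cs (some p.2) none)
          else
            String.ofList (PySem.Chars.slice cs (some p.2)
              (some (PySem.List.pyGetD full (p.1 + 1) 0 - 1))))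
      = closedSegs cs suf ++ [String.ofList (cs.drop ((suf.getLast hsuf).toNat))] := by
  intro suf
  induction suf with
  | nil => intro pre h hsuf; exact absurd rfl hsuf
  | cons j t ih =>
      intro pre h hsuf
      cases t with
      | nil =>
          -- last element of full
          have hlast : PySem.List.pyGetD full (-1) 0 = j := by
            rw [h]; exact pyGetD_last pre j
          have hj := hb j (by rw [h]; simp)
          simp only [PySem.List.enumerate_cons, PySem.List.enumerate_nil, List.map, hlast,
            BEq.rfl, if_true]
          simp only [PySem.Chars.slice_eq_listSlice]
          rw [PySem.List.slice_from cs hj.1]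
          simp [closedSegs]
      | cons j' rest =>
          subst h
          have hlast : PySem.List.pyGetD (pre ++ j :: j' :: rest) (-1) 0
              = (j' :: rest).getLast (by simp) := by
            rw [pyGetD_neg_one _ (by simp)]
            rw [getLast_append_right pre (j :: j' :: rest) (by simp)]
            simp
          have hsufpw : (j :: j' :: rest).Pairwise (· < ·) := by
            have hsl : (j :: j' :: rest) <:+ (pre ++ j :: j' :: rest) := ⟨pre, rfl⟩
            exact hp.sublist hsl.sublist
          have hjlt : j < (j' :: rest).getLast (by simp) := by
            rcases List.pairwise_cons.mp hsufpw with ⟨hall, _⟩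
            exact hall _ (List.getLast_mem _)
          have hcond : (j == PySem.List.pyGetD (pre ++ j :: j' :: rest) (-1) 0) = false := by
            rw [hlast]
            simp; omega
          have hmid : PySem.List.pyGetD (pre ++ j :: j' :: rest) ((pre.length : Int) + 1) 0 = j' :=
            pyGetD_mid pre j j' rest
          have hj := hb j (by simp)
          have hj' := hb j' (by simp)
          have hjj' : j < j' := (List.pairwise_cons.mp hsufpw).1 j' (by simp)
          have hslice : PySem.Chars.slice cs (some j) (some (j' - 1))
              = (cs.drop j.toNat).take ((j' - 1).toNat - j.toNat) := by
            have := PySem.List.slice_toNat cs (a := j) (b := j' - 1) hj.1 (by omega)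
            simpa using this
          rw [PySem.List.enumerate_cons, List.map_cons]
          simp only [hcond, Bool.false_eq_true, if_false, hmid, hslice]
          have hrec := ih (pre ++ [j]) (by simp) (by simp)
          have hlen : ((pre ++ [j]).length : Int) = (pre.length : Int) + 1 := by
            simp
          rw [hlen] at hrec
          rw [hrec]
          simp only [closedSegs]
          have hgl : (j' :: rest).getLast (by simp)
              = ((j :: j' :: rest).getLast (by simp)) := by
            simp
          rw [hgl]
          simp

-- ===== VERDICT (by name: the statement is the Claim_ definition above) =====
theorem split_scale_without_numbers_spec : Claim_equal_split_scale_without_numbers := by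
  intro sentence _
  unfold Spec_split_scale_without_numbers
  unfold split_scale_without_numbers split_scale_without_numbers_alt
  set cs := sentence.toList with hcs
  obtain ⟨hb, hp, hnil, hsnoc⟩ := master cs
  have hidx : (PySem.List.enumerate cs).foldl
      (fun acc p => if PySem.Chars.isupper p.2 then acc ++ [p.1] else acc) ([] : List Int)
      = upIdx cs := by
    rw [PySem.List.foldl_append_if (fun (q : Int × Char) => PySem.Chars.isupper q.2)
      (fun (q : Int × Char) => q.1) (PySem.List.enumerate cs) []]
    simp [upIdx]
  have hbfold : cs.foldl
      (fun (st : Nat × List Char × List String) c =>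
        if PySem.Chars.isupper c then
          if st.1 > 0 then (st.1 + 1, [c], st.2.2 ++ [String.ofList st.2.1.dropLast])
          else (st.1 + 1, [c], st.2.2)
        else if st.1 > 0 then (st.1, st.2.1 ++ [c], st.2.2)
        else st) (0, [], [])
      = cs.foldl bStep (0, [], []) := rfl
  simp only [hidx, hbfold]
  by_cases hemp : upIdx cs = []
  · rw [hemp, hnil hemp]
    simp
  · obtain ⟨js, j, hdec⟩ : ∃ js j, upIdx cs = js ++ [j] :=
      ⟨(upIdx cs).dropLast, (upIdx cs).getLast hemp,
        (List.dropLast_append_getLast hemp).symm⟩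
    rw [hdec] at hb hp
    rw [hsnoc js j hdec, hdec]
    cases js with
    | nil => simp
    | cons b bs =>
        have hlenA : ((b :: bs) ++ [j]).length > 1 := by simp
        have hlenB : ((b :: bs).length + 1 : Nat) > 1 := by simp
        rw [if_pos hlenA, if_pos hlenB]
        have hsplit : (fun (acc : List String) (p : Int × Int) =>
            if p.2 == PySem.List.pyGetD ((b :: bs) ++ [j]) (-1) 0 then
              acc ++ [String.ofList (PySem.Chars.slice cs (some p.2) none)]
            else
              acc ++ [String.ofList (PySem.Chars.slice cs (some p.2)
                        (some (PySem.List.pyGetD ((b :: bs) ++ [j]) (p.1 + 1) 0 - 1)))])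
          = fun acc p => acc ++
              [if p.2 == PySem.List.pyGetD ((b :: bs) ++ [j]) (-1) 0 then
                 String.ofList (PySem.Chars.slice cs (some p.2) none)
               else
                 String.ofList (PySem.Chars.slice cs (some p.2)
                   (some (PySem.List.pyGetD ((b :: bs) ++ [j]) (p.1 + 1) 0 - 1)))] := by
          funext acc p
          split_ifs <;> rfl
        rw [hsplit, PySem.List.foldl_append_singleton_eq_map]
        have hitems := A_items cs ((b :: bs) ++ [j]) hb hp ((b :: bs) ++ [j]) [] (by simp)
          (by simp)
        simp only [List.length_nil, Nat.cast_zero] at hitems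
        rw [hitems]
        have hgl : (((b :: bs) ++ [j]).getLast (by simp)) = j := by simp
        rw [hgl]
        simp
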